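-- pv_equiv track=rewrite | github.com/ZG2017/Leetcode_python3 | 4_stars/py/2560. House Robber IV.py | canRob
-- ===== SOURCE A (Python) =====
-- def canRob(nums, mid, k):
--     count = 0
--     n = len(nums)
--     i = 0
--     while i < n:
--         if nums[i] <= mid:
--             count += 1
--             i += 1
--         i += 1
--     return count >= k
-- ===== SOURCE B (Python) =====
-- def canRob(nums, mid, k):
--     # House Robber DP: incl = best count with current element taken (-1 = impossible),
--     # excl = best count without it.
--     incl, excl = -1, 0
--     for x in nums:
--         incl, excl = (excl + 1 if x <= mid else -1), max(incl, excl)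
--     return max(incl, excl) >= k
-- ===== Notes on version B (the rewrite author's own statement) =====
-- stated objective: alternative
-- what changed: Replaces A's greedy index scan (take an eligible element, jump two) with the House Robber dynamic program maintaining incl/excl counts over a single fold.
import Mathlib
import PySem

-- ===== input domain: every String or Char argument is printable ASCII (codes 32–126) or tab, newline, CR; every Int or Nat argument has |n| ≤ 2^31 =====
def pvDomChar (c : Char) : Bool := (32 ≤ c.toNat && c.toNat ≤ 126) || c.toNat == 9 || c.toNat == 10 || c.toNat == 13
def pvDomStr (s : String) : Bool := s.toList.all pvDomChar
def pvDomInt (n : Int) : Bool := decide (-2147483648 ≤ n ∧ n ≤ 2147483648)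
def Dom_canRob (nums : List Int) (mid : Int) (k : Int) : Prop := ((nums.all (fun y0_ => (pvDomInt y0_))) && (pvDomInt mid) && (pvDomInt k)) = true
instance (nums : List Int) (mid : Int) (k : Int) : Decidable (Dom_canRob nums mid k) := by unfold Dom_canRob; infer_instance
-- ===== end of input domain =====

-- B replaces A's greedy pick-and-skip index scan with the House Robber incl/excl
-- dynamic program over a single fold (alternative algorithm, same O(n) cost).


-- ===== PORT A =====
-- A's while loop: count eligible elements greedily, jumping the index by 2 after a take.
def canRobGo (nums : List Int) (mid : Int) (n : Int) (i : Int) (count : Int) : Int :=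
  if _h : i < n then
    if (PySem.List.pyGet? nums i).getD 0 ≤ mid then
      canRobGo nums mid n (i + 2) (count + 1)
    else
      canRobGo nums mid n (i + 1) count
  else count
termination_by (n - i).toNat
decreasing_by all_goals omega

def canRob (nums : List Int) (mid : Int) (k : Int) : Bool :=
  decide (canRobGo nums mid (nums.length : Int) 0 0 ≥ k)

-- ===== PORT B =====
def canRob_alt (nums : List Int) (mid : Int) (k : Int) : Bool :=
  let p := nums.foldl
    (fun (s : Int × Int) x => (if x ≤ mid then s.2 + 1 else -1, max s.1 s.2))
    ((-1 : Int), (0 : Int))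
  decide (max p.1 p.2 ≥ k)

-- ===== PRECONDITION & SPEC =====
def Spec_canRob (nums : List Int) (mid : Int) (k : Int) (out : Bool) : Prop := out = canRob_alt nums mid k
instance (nums : List Int) (mid : Int) (k : Int) (out : Bool) : Decidable (Spec_canRob nums mid k out) := by unfold Spec_canRob; infer_instance

-- ===== CLAIM (what is proved, stated in full; the proofs are below) =====
def Claim_equal_canRob : Prop := ∀ (nums : List Int) (mid : Int) (k : Int), Dom_canRob nums mid k → Spec_canRob nums mid k (canRob nums mid k)

-- ===== LEMMAS AND PROOFS =====

-- greedy count, structurally: take x if eligible and skip the next element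
def gS (mid : Int) : List Int → Int
  | [] => 0
  | [x] => if x ≤ mid then 1 else 0
  | x :: y :: r => if x ≤ mid then 1 + gS mid r else gS mid (y :: r)

theorem gS_cons (mid x : Int) (l : List Int) :
    gS mid (x :: l) = if x ≤ mid then 1 + gS mid l.tail else gS mid l := by
  cases l <;> simp [gS]

-- A's index loop computes count + greedy count of the remaining suffix
theorem go_eq (mid : Int) : ∀ (f : Nat) (nums : List Int) (i count : Int), 0 ≤ i →
    ((nums.length : Int) - i).toNat ≤ f →
    canRobGo nums mid (nums.length : Int) i count = count + gS mid (nums.drop i.toNat) := by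
  intro f
  induction f with
  | zero =>
    intro nums i count hi hf
    rw [canRobGo]
    have hin : ¬ (i < (nums.length : Int)) := by omega
    have hd : nums.length ≤ i.toNat := by omega
    simp [hin, List.drop_eq_nil_of_le hd, gS]
  | succ f ih =>
    intro nums i count hi hf
    rw [canRobGo]
    by_cases hin : i < (nums.length : Int)
    · have hlt : i.toNat < nums.length := by omega
      have hget : PySem.List.pyGet? nums i = some nums[i.toNat] :=
        PySem.List.pyGet?_eq_some_getElem nums hi hin
      have hdrop : nums.drop i.toNat = nums[i.toNat] :: nums.drop (i.toNat + 1) :=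
        List.drop_eq_getElem_cons hlt
      have ht1 : (i + 1).toNat = i.toNat + 1 := by omega
      have ht2 : (i + 2).toNat = i.toNat + 2 := by omega
      rw [hdrop, gS_cons]
      simp only [hin, dif_pos, hget, Option.getD_some]
      by_cases hx : nums[i.toNat] ≤ mid
      · simp only [hx, if_pos]
        rw [ih nums (i + 2) (count + 1) (by omega) (by omega), ht2]
        have : (nums.drop (i.toNat + 1)).tail = nums.drop (i.toNat + 2) := by
          rw [List.tail_drop]
        rw [this]
        omega
      · simp only [hx, if_neg, not_false_iff]
        rw [ih nums (i + 1) count (by omega) (by omega), ht1]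
    · simp at hin
      have hd : nums.length ≤ i.toNat := by omega
      simp [show ¬ (i < (nums.length : Int)) by omega, List.drop_eq_nil_of_le hd, gS]

def dpStep (mid : Int) (s : Int × Int) (x : Int) : Int × Int :=
  (if x ≤ mid then s.2 + 1 else -1, max s.1 s.2)

-- DP fold equals greedy count: mutual invariant for the two states the greedy can be in
theorem dp_inv (mid : Int) : ∀ (l : List Int),
    (∀ i e : Int, i ≤ e → 0 ≤ e →
      max (l.foldl (dpStep mid) (i, e)).1 (l.foldl (dpStep mid) (i, e)).2 = e + gS mid l) ∧
    (∀ c : Int, 1 ≤ c →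
      max (l.foldl (dpStep mid) (c, c - 1)).1 (l.foldl (dpStep mid) (c, c - 1)).2 = c + gS mid l.tail) := by
  intro l
  induction l with
  | nil =>
    constructor
    · intro i e hie he; simp [gS]; omega
    · intro c hc; simp [gS]
  | cons x l ih =>
    constructor
    · intro i e hie he
      rw [List.foldl_cons]
      by_cases hx : x ≤ mid
      · have : dpStep mid (i, e) x = (e + 1, e) := by
          simp [dpStep, hx]; omega
        rw [this]
        have h2 := ih.2 (e + 1) (by omega)
        simp only [show e + 1 - 1 = e by omega] at h2
        rw [h2, gS_cons]
        simp [hx]; omega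
      · have : dpStep mid (i, e) x = (-1, e) := by
          simp [dpStep, hx]; omega
        rw [this, ih.1 (-1) e (by omega) he, gS_cons]
        simp [hx]
    · intro c hc
      rw [List.foldl_cons, List.tail_cons]
      by_cases hx : x ≤ mid
      · have : dpStep mid (c, c - 1) x = (c, c) := by
          simp [dpStep, hx]
        rw [this, ih.1 c c le_rfl (by omega)]
      · have : dpStep mid (c, c - 1) x = (-1, c) := by
          simp [dpStep, hx]
        rw [this, ih.1 (-1) c (by omega) (by omega)]

-- ===== VERDICT (by name: the statement is the Claim_ definition above) =====
theorem canRob_spec : Claim_equal_canRob := by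
  intro nums mid k _
  unfold Spec_canRob canRob canRob_alt
  have hA := go_eq mid ((nums.length : Int) - 0).toNat nums 0 0 le_rfl le_rfl
  have hB := (dp_inv mid nums).1 (-1) 0 (by omega) le_rfl
  simp only [Int.toNat_zero, List.drop_zero, zero_add] at hA
  simp only [zero_add] at hB
  have hfold : nums.foldl
      (fun (s : Int × Int) x => (if x ≤ mid then s.2 + 1 else -1, max s.1 s.2))
      ((-1 : Int), (0 : Int)) = nums.foldl (dpStep mid) (-1, 0) := rfl
  simp only [hfold]
  rw [hA, hB]
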